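-- pv_equiv track=rewrite | github.com/jjoshua2/arc_agi | unsolved/2025-10-08T20-44-48Z/d22278a0_best1.py | transform
-- ===== SOURCE A (Python) =====
-- def transform(grid_lst: list[list[int]]) -> list[list[int]]:
--     if not grid_lst:
--         return []
--     n = len(grid_lst)
--     if n == 0:
--         return []
--     m = len(grid_lst[0])
--     seeds = []
--     for c in range(m):
--         if grid_lst[0][c] != 0:
--             seeds.append((0, c, grid_lst[0][c]))
--         if grid_lst[n-1][c] != 0:
--             seeds.append((n-1, c, grid_lst[n-1][c]))
--
--     output_grid = [[0] * m for _ in range(n)]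
--     INF = 10**9
--
--     is_odd = n % 2 == 1
--     mid = (n - 1) // 2 if is_odd else -1
--
--     for r in range(n):
--         if is_odd and r == mid:
--             continue
--         for c in range(m):
--             candidates = []
--             for seed_r, s_col, color in seeds:
--                 is_top_seed = (seed_r == 0)
--                 local_r = r if is_top_seed else (n - 1 - r)
--
--                 # Determine type
--                 left_type = (s_col == 0)
--                 right_type = (s_col == m - 1)
--                 if not left_type and not right_type:
--                     continue  # Assume only edge seeds
--
--                 if left_type:
--                     if c < s_col:
--                         continue
--                     local_c = c - s_col
--                 else:  # right_type
--                     if c > s_col: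
--                         continue
--                     local_c = s_col - c
--
--                 # Compute dist_opp
--                 opposite_seeds = [sd for sd in seeds if (is_top_seed and sd[0] != 0) or (not is_top_seed and sd[0] == 0)]
--                 dists = [abs(s_col - sd[1]) for sd in opposite_seeds if sd[1] != s_col]
--                 dist_opp = min(dists) if dists else INF
--                 max_lc_opp = dist_opp - local_r - 1 if dist_opp < INF else INF
--                 if local_c > max_lc_opp:
--                     continue
--
--                 if is_filled(local_r, local_c):
--                     total = local_r + local_c
--                     candidates.append((total, local_r, s_col, color))
--
--             if candidates:
--                 candidates.sort()
--                 output_grid[r][c] = candidates[0][3]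
--
--     # Place the original seeds in case, but should already be placed
--     for seed_r, s_col, color in seeds:
--         output_grid[seed_r][s_col] = color
--
--     return output_grid
--
-- def is_filled(lr: int, lc: int) -> bool:
--     if lr % 2 == 0:
--         return lc <= lr or (lc % 2 == 0 and lc >= lr + 2)
--     else:
--         return lc % 2 == 0 and lc >= lr + 1
-- ===== SOURCE B (Python) =====
-- def is_filled(lr: int, lc: int) -> bool:
--     if lr % 2 == 0:
--         return lc <= lr or (lc % 2 == 0 and lc >= lr + 2)
--     else:
--         return lc % 2 == 0 and lc >= lr + 1
--
--
-- def transform(grid_lst: list[list[int]]) -> list[list[int]]: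
--     if not grid_lst:
--         return []
--     n = len(grid_lst)
--     m = len(grid_lst[0])
--     seeds = []
--     for c in range(m):
--         if grid_lst[0][c] != 0:
--             seeds.append((0, c, grid_lst[0][c]))
--         if grid_lst[n - 1][c] != 0:
--             seeds.append((n - 1, c, grid_lst[n - 1][c]))
--
--     INF = 10 ** 9
--     # hoist the per-seed work out of the cell loops: edge filter + dist_opp once per seed
--     info = []
--     for seed_r, s_col, color in seeds:
--         if s_col != 0 and s_col != m - 1:
--             continue
--         top = seed_r == 0
--         ds = [abs(s_col - sd[1]) for sd in seeds
--               if ((sd[0] != 0) if top else (sd[0] == 0)) and sd[1] != s_col]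
--         dist_opp = min(ds) if ds else INF
--         info.append((seed_r, s_col, color, top, dist_opp))
--
--     is_odd = n % 2 == 1
--     mid = (n - 1) // 2
--
--     def cell(r, c):
--         if is_odd and r == mid:
--             return 0
--         best = None
--         for seed_r, s_col, color, top, dist_opp in info:
--             local_r = r if top else n - 1 - r
--             if s_col == 0:
--                 local_c = c
--             else:
--                 if c > s_col:
--                     continue
--                 local_c = s_col - c
--             max_lc = dist_opp - local_r - 1 if dist_opp < INF else INF
--             if local_c > max_lc:
--                 continue
--             if is_filled(local_r, local_c):
--                 cand = (local_r + local_c, local_r, s_col, color)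
--                 if best is None or cand < best:
--                     best = cand
--         return best[3] if best is not None else 0
--
--     out = [[cell(r, c) for c in range(m)] for r in range(n)]
--     for seed_r, s_col, color in seeds:
--         out[seed_r][s_col] = color
--     return out
-- ===== Notes on version B (the rewrite author's own statement) =====
-- stated objective: faster
-- what changed: Per-seed work (the edge-seed filter and the quadratic opposite-seed distance scan) is hoisted out of the cell loops into a precomputed info list, and per cell the build-list-then-sort-then-take-first is replaced by a single-pass running minimum over the precomputed seeds.
import Mathlib
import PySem

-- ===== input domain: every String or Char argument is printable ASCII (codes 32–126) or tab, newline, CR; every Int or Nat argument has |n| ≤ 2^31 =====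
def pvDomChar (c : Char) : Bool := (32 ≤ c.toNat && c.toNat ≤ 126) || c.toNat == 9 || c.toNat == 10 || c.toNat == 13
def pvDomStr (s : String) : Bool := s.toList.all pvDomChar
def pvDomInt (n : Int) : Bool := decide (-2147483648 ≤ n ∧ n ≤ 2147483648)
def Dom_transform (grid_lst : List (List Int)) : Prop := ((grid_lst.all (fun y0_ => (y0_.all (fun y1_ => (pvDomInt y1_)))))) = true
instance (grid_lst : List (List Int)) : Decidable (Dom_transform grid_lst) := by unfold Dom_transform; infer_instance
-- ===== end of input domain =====

-- B hoists the per-seed work (edge filter + opposite-seed distance scan) out of the cell loops and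
-- replaces the per-cell build-list-then-sort-then-take-first by a single-pass running minimum.

-- ===== PORT A =====
-- shared helper: Python helper is_filled (both sources contain it verbatim); lr, lc are always ≥ 0
def isFilled (lr lc : Nat) : Bool :=
  if lr % 2 = 0 then decide (lc ≤ lr) || (lc % 2 = 0 && decide (lr + 2 ≤ lc))
  else lc % 2 = 0 && decide (lr + 1 ≤ lc)

-- shared helper: Python tuple comparison key (lexicographic on the 4-tuple, as candidates.sort() / `cand < best` compare)
def keyT (t : Nat × Nat × Nat × Int) : Nat ×ₗ (Nat ×ₗ (Nat ×ₗ Int)) :=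
  toLex (t.1, toLex (t.2.1, toLex (t.2.2.1, t.2.2.2)))

def pvINF : Int := 10 ^ 9

-- shared helper: the seed-collecting loop (identical in both Pythons); row indices are 0 and n-1, hence Nat
def pvSeedsOf (n : Nat) (row0 rowL : List Int) : List (Nat × Nat × Int) :=
  (List.range row0.length).foldl (fun acc c =>
    let acc2 := if row0.getD c 0 ≠ 0 then acc ++ [(0, c, row0.getD c 0)] else acc
    if rowL.getD c 0 ≠ 0 then acc2 ++ [(n - 1, c, rowL.getD c 0)] else acc2) []

-- shared helper: the final seed-placement loop (identical in both Pythons; indices in range under Pre_)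
def pvPlace (seeds : List (Nat × Nat × Int)) (g : List (List Int)) : List (List Int) :=
  seeds.foldl (fun g sd => g.set sd.1 ((g.getD sd.1 []).set sd.2.1 sd.2.2)) g

-- A's inner seed loop body (the `continue` chain), one candidate appended or not
def pvCandBodyA (n m : Nat) (seeds : List (Nat × Nat × Int)) (r c : Nat)
    (cands : List (Nat × Nat × Nat × Int)) (sd : Nat × Nat × Int) : List (Nat × Nat × Nat × Int) :=
  if sd.2.1 ≠ 0 ∧ sd.2.1 ≠ m - 1 then cands
  else if (if sd.2.1 = 0 then c < sd.2.1 else c > sd.2.1) then cands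
  else
    let localR := if sd.1 = 0 then r else n - 1 - r
    let localC := if sd.2.1 = 0 then c - sd.2.1 else sd.2.1 - c
    let dists : List Int :=
      ((seeds.filter (fun sd2 => if sd.1 = 0 then decide (sd2.1 ≠ 0) else decide (sd2.1 = 0))).filter
        (fun sd2 => decide (sd2.2.1 ≠ sd.2.1))).map (fun sd2 => (((sd.2.1 : Int) - (sd2.2.1 : Int)).natAbs : Int))
    let distOpp : Int := if dists = [] then pvINF else (PySem.List.min? dists (fun x => x)).getD pvINF
    let maxLc : Int := if distOpp < pvINF then distOpp - (localR : Int) - 1 else pvINF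
    if (localC : Int) > maxLc then cands
    else if isFilled localR localC then cands ++ [(localR + localC, localR, sd.2.1, sd.2.2)] else cands

def pvCandsA (n m : Nat) (seeds : List (Nat × Nat × Int)) (r c : Nat) : List (Nat × Nat × Nat × Int) :=
  seeds.foldl (pvCandBodyA n m seeds r c) []

-- `candidates.sort(); output_grid[r][c] = candidates[0][3]`
def pvCellA (n m : Nat) (seeds : List (Nat × Nat × Int)) (r c : Nat) : Int :=
  let cands := pvCandsA n m seeds r c
  if cands = [] then 0 else ((PySem.List.sorted cands keyT false).headD (0, 0, 0, 0)).2.2.2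

def transform (grid_lst : List (List Int)) : List (List Int) :=
  if grid_lst = [] then []
  else
    let n := grid_lst.length
    if n = 0 then []
    else
      let m := (grid_lst.headD []).length
      let seeds := pvSeedsOf n (grid_lst.headD []) (grid_lst.getLastD [])
      let og : List (List Int) :=
        (List.range n).map (fun r =>
          if n % 2 = 1 ∧ r = (n - 1) / 2 then List.replicate m 0
          else (List.range m).map (fun c => pvCellA n m seeds r c))
      pvPlace seeds og

-- ===== PORT B =====
-- B's `if best is None or cand < best: best = cand`
def pvStep (b : Option (Nat × Nat × Nat × Int)) (x : Nat × Nat × Nat × Int) :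
    Option (Nat × Nat × Nat × Int) :=
  match b with
  | none => some x
  | some t => if keyT x < keyT t then some x else some t

-- B's per-seed precomputation loop body (edge filter + dist_opp)
def pvInfoBodyB (m : Nat) (seeds : List (Nat × Nat × Int))
    (acc : List (Nat × Nat × Int × Bool × Int)) (sd : Nat × Nat × Int) : List (Nat × Nat × Int × Bool × Int) :=
  if sd.2.1 ≠ 0 ∧ sd.2.1 ≠ m - 1 then acc
  else
    let top := decide (sd.1 = 0)
    let ds : List Int :=
      (seeds.filter (fun sd2 =>
        (if top then decide (sd2.1 ≠ 0) else decide (sd2.1 = 0)) && decide (sd2.2.1 ≠ sd.2.1))).map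
        (fun sd2 => (((sd.2.1 : Int) - (sd2.2.1 : Int)).natAbs : Int))
    let distOpp : Int := if ds = [] then pvINF else (PySem.List.min? ds (fun x => x)).getD pvINF
    acc ++ [(sd.1, sd.2.1, sd.2.2, top, distOpp)]

def pvInfoB (m : Nat) (seeds : List (Nat × Nat × Int)) : List (Nat × Nat × Int × Bool × Int) :=
  seeds.foldl (pvInfoBodyB m seeds) []

-- B's running-minimum update for one precomputed seed
def pvBestBodyB (n r c : Nat) (b : Option (Nat × Nat × Nat × Int)) (i : Nat × Nat × Int × Bool × Int) :
    Option (Nat × Nat × Nat × Int) :=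
  if ¬(i.2.1 = 0) ∧ c > i.2.1 then b
  else
    let localR := if i.2.2.2.1 then r else n - 1 - r
    let localC := if i.2.1 = 0 then c else i.2.1 - c
    let maxLc : Int := if i.2.2.2.2 < pvINF then i.2.2.2.2 - (localR : Int) - 1 else pvINF
    if (localC : Int) > maxLc then b
    else if isFilled localR localC then pvStep b (localR + localC, localR, i.2.1, i.2.2.1)
    else b

def pvCellB (n : Nat) (info : List (Nat × Nat × Int × Bool × Int)) (r c : Nat) : Int :=
  if n % 2 = 1 ∧ r = (n - 1) / 2 then 0
  else
    match info.foldl (pvBestBodyB n r c) none with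
    | none => 0
    | some t => t.2.2.2

def transform_alt (grid_lst : List (List Int)) : List (List Int) :=
  if grid_lst = [] then []
  else
    let n := grid_lst.length
    let m := (grid_lst.headD []).length
    let seeds := pvSeedsOf n (grid_lst.headD []) (grid_lst.getLastD [])
    let info := pvInfoB m seeds
    pvPlace seeds ((List.range n).map (fun r => (List.range m).map (fun c => pvCellB n info r c)))

-- ===== PRECONDITION & SPEC =====
-- Pre_ excludes exactly the inputs where the Python A raises IndexError: a non-empty grid whose
-- last row is shorter than its first row (grid_lst[n-1][c] for c in range(len(grid_lst[0]))).
def Pre_transform (grid_lst : List (List Int)) : Prop :=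
  grid_lst = [] ∨ (grid_lst.headD []).length ≤ (grid_lst.getLastD []).length
instance (grid_lst : List (List Int)) : Decidable (Pre_transform grid_lst) := by
  unfold Pre_transform; infer_instance

def pvWitness_transform : List (List Int) := [[1, 0, 2], [0, 0, 0], [0, 0, 0], [3, 0, 0]]

def Spec_transform (grid_lst : List (List Int)) (out : List (List Int)) : Prop := out = transform_alt grid_lst
instance (grid_lst : List (List Int)) (out : List (List Int)) : Decidable (Spec_transform grid_lst out) := by
  unfold Spec_transform; infer_instance

-- ===== CLAIM (what is proved, stated in full; the proofs are below) =====
def Claim_equal_transform : Prop := ∀ (grid_lst : List (List Int)), Dom_transform grid_lst → Pre_transform grid_lst → Spec_transform grid_lst (transform grid_lst)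

-- ===== LEMMAS AND PROOFS =====

-- A's seed-loop body as an Option-valued candidate function
def pvFA (n m : Nat) (seeds : List (Nat × Nat × Int)) (r c : Nat) (sd : Nat × Nat × Int) :
    Option (Nat × Nat × Nat × Int) :=
  if sd.2.1 ≠ 0 ∧ sd.2.1 ≠ m - 1 then none
  else if (if sd.2.1 = 0 then c < sd.2.1 else c > sd.2.1) then none
  else
    let localR := if sd.1 = 0 then r else n - 1 - r
    let localC := if sd.2.1 = 0 then c - sd.2.1 else sd.2.1 - c
    let dists : List Int :=
      ((seeds.filter (fun sd2 => if sd.1 = 0 then decide (sd2.1 ≠ 0) else decide (sd2.1 = 0))).filter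
        (fun sd2 => decide (sd2.2.1 ≠ sd.2.1))).map (fun sd2 => (((sd.2.1 : Int) - (sd2.2.1 : Int)).natAbs : Int))
    let distOpp : Int := if dists = [] then pvINF else (PySem.List.min? dists (fun x => x)).getD pvINF
    let maxLc : Int := if distOpp < pvINF then distOpp - (localR : Int) - 1 else pvINF
    if (localC : Int) > maxLc then none
    else if isFilled localR localC then some (localR + localC, localR, sd.2.1, sd.2.2) else none

-- B's info-loop body as an Option-valued function
def pvEn (m : Nat) (seeds : List (Nat × Nat × Int)) (sd : Nat × Nat × Int) :
    Option (Nat × Nat × Int × Bool × Int) :=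
  if sd.2.1 ≠ 0 ∧ sd.2.1 ≠ m - 1 then none
  else
    let top := decide (sd.1 = 0)
    let ds : List Int :=
      (seeds.filter (fun sd2 =>
        (if top then decide (sd2.1 ≠ 0) else decide (sd2.1 = 0)) && decide (sd2.2.1 ≠ sd.2.1))).map
        (fun sd2 => (((sd.2.1 : Int) - (sd2.2.1 : Int)).natAbs : Int))
    let distOpp : Int := if ds = [] then pvINF else (PySem.List.min? ds (fun x => x)).getD pvINF
    some (sd.1, sd.2.1, sd.2.2, top, distOpp)

-- B's best-update body as an Option-valued candidate function
def pvFB (n r c : Nat) (i : Nat × Nat × Int × Bool × Int) : Option (Nat × Nat × Nat × Int) :=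
  if ¬(i.2.1 = 0) ∧ c > i.2.1 then none
  else
    let localR := if i.2.2.2.1 then r else n - 1 - r
    let localC := if i.2.1 = 0 then c else i.2.1 - c
    let maxLc : Int := if i.2.2.2.2 < pvINF then i.2.2.2.2 - (localR : Int) - 1 else pvINF
    if (localC : Int) > maxLc then none
    else if isFilled localR localC then some (localR + localC, localR, i.2.1, i.2.2.1)
    else none

lemma pvCandBodyA_eq (n m : Nat) (seeds : List (Nat × Nat × Int)) (r c : Nat)
    (cands : List (Nat × Nat × Nat × Int)) (sd : Nat × Nat × Int) :
    pvCandBodyA n m seeds r c cands sd = cands ++ (pvFA n m seeds r c sd).toList := by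
  simp only [pvCandBodyA, pvFA]
  split_ifs <;> simp

lemma pvCandsA_eq (n m : Nat) (seeds : List (Nat × Nat × Int)) (r c : Nat) :
    pvCandsA n m seeds r c = seeds.filterMap (pvFA n m seeds r c) := by
  unfold pvCandsA
  rw [PySem.List.foldl_congr_mem _ _ (fun cands sd => cands ++ (pvFA n m seeds r c sd).toList) _
      (fun cands sd _ => pvCandBodyA_eq n m seeds r c cands sd),
    PySem.List.foldl_append_eq_flatMap, ← List.filterMap_eq_flatMap_toList]
  simp

lemma pvInfoBodyB_eq (m : Nat) (seeds : List (Nat × Nat × Int))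
    (acc : List (Nat × Nat × Int × Bool × Int)) (sd : Nat × Nat × Int) :
    pvInfoBodyB m seeds acc sd = acc ++ (pvEn m seeds sd).toList := by
  simp only [pvInfoBodyB, pvEn]
  split_ifs <;> simp

lemma pvInfoB_eq (m : Nat) (seeds : List (Nat × Nat × Int)) :
    pvInfoB m seeds = seeds.filterMap (pvEn m seeds) := by
  unfold pvInfoB
  rw [PySem.List.foldl_congr_mem _ _ (fun acc sd => acc ++ (pvEn m seeds sd).toList) _
      (fun acc sd _ => pvInfoBodyB_eq m seeds acc sd),
    PySem.List.foldl_append_eq_flatMap, ← List.filterMap_eq_flatMap_toList]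
  simp

lemma pvCompose (n m : Nat) (seeds : List (Nat × Nat × Int)) (r c : Nat) (sd : Nat × Nat × Int) :
    (pvEn m seeds sd).bind (pvFB n r c) = pvFA n m seeds r c sd := by
  have hfil :
      (seeds.filter (fun sd2 =>
          (if decide (sd.1 = 0) then decide (sd2.1 ≠ 0) else decide (sd2.1 = 0)) && decide (sd2.2.1 ≠ sd.2.1)))
        = ((seeds.filter (fun sd2 => if sd.1 = 0 then decide (sd2.1 ≠ 0) else decide (sd2.1 = 0))).filter
            (fun sd2 => decide (sd2.2.1 ≠ sd.2.1))) := by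
    rw [List.filter_filter]
    apply List.filter_congr
    intro x _
    by_cases h0 : sd.1 = 0 <;> simp [h0, Bool.and_comm]
  simp only [pvEn, pvFA, pvFB]
  by_cases he : sd.2.1 ≠ 0 ∧ sd.2.1 ≠ m - 1
  · simp [he]
  · rw [if_neg he, if_neg he]
    simp only [Option.bind_some, hfil]
    by_cases h0 : sd.2.1 = 0 <;> simp [h0]

lemma pvBestBodyB_eq (n r c : Nat) (b : Option (Nat × Nat × Nat × Int)) (i : Nat × Nat × Int × Bool × Int) :
    pvBestBodyB n r c b i = (pvFB n r c i).elim b (pvStep b) := by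
  simp only [pvBestBodyB, pvFB]
  split_ifs <;> rfl

lemma pv_foldl_filterMap {α β γ : Type} (f : α → Option β) (step : γ → β → γ) :
    ∀ (l : List α) (init : γ),
      (l.filterMap f).foldl step init
        = l.foldl (fun acc x => (f x).elim acc (step acc)) init := by
  intro l
  induction l with
  | nil => intro init; rfl
  | cons x l ih =>
    intro init
    cases hfx : f x <;> simp [hfx, ih]

lemma pvStep_min :
    ∀ (L : List (Nat × Nat × Nat × Int)) (t : Nat × Nat × Nat × Int),
      ∃ u, L.foldl pvStep (some t) = some u ∧ (u = t ∨ u ∈ L) ∧ keyT u ≤ keyT t ∧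
        ∀ y ∈ L, keyT u ≤ keyT y := by
  intro L
  induction L with
  | nil => intro t; exact ⟨t, rfl, Or.inl rfl, le_refl _, by simp⟩
  | cons x L ih =>
    intro t
    by_cases hlt : keyT x < keyT t
    · obtain ⟨u, hu, hmem, hle, hall⟩ := ih x
      refine ⟨u, ?_, ?_, le_of_lt (lt_of_le_of_lt hle hlt), ?_⟩
      · simpa [pvStep, hlt] using hu
      · rcases hmem with h | h
        · exact Or.inr (by simp [h])
        · exact Or.inr (by simp [h])
      · intro y hy
        rcases List.mem_cons.mp hy with h | h
        · subst h; exact hle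
        · exact hall y h
    · obtain ⟨u, hu, hmem, hle, hall⟩ := ih t
      refine ⟨u, ?_, ?_, hle, ?_⟩
      · simpa [pvStep, hlt] using hu
      · rcases hmem with h | h
        · exact Or.inl h
        · exact Or.inr (by simp [h])
      · intro y hy
        rcases List.mem_cons.mp hy with h | h
        · subst h; exact le_trans hle (le_of_not_gt hlt)
        · exact hall y h

lemma keyT_inj {a b : Nat × Nat × Nat × Int} (h : keyT a = keyT b) : a = b := by
  unfold keyT at h
  simp only [toLex_inj, Prod.ext_iff] at h
  obtain ⟨h1, h2, h3, h4⟩ := h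
  exact Prod.ext h1 (Prod.ext h2 (Prod.ext h3 h4))

lemma pvCell_eq (n m : Nat) (seeds : List (Nat × Nat × Int)) (r c : Nat)
    (hmid : ¬(n % 2 = 1 ∧ r = (n - 1) / 2)) :
    pvCellA n m seeds r c = pvCellB n (pvInfoB m seeds) r c := by
  unfold pvCellA pvCellB
  rw [if_neg hmid]
  have hfold : (pvInfoB m seeds).foldl (pvBestBodyB n r c) none
      = (pvCandsA n m seeds r c).foldl pvStep none := by
    have h1 : (pvInfoB m seeds).foldl (pvBestBodyB n r c) none
        = ((pvInfoB m seeds).filterMap (pvFB n r c)).foldl pvStep none := by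
      rw [pv_foldl_filterMap]
      exact PySem.List.foldl_congr_mem _ _ _ _ (fun b i _ => pvBestBodyB_eq n r c b i)
    rw [h1, pvInfoB_eq, List.filterMap_filterMap]
    congr 1
    rw [pvCandsA_eq]
    exact List.filterMap_congr (fun sd _ => pvCompose n m seeds r c sd)
  rw [hfold]
  cases hL : pvCandsA n m seeds r c with
  | nil => simp
  | cons x L =>
    simp only [if_neg (by simp : ¬(x :: L = []))]
    obtain ⟨u, hu, hmem, hle, hall⟩ := pvStep_min L x
    have hfold2 : (x :: L).foldl pvStep none = some u := by
      simpa [List.foldl_cons, pvStep] using hu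
    rw [hfold2]
    have humem : u ∈ x :: L := by
      rcases hmem with h | h
      · simp [h]
      · simp [h]
    have huall : ∀ y ∈ x :: L, keyT u ≤ keyT y := by
      intro y hy
      rcases List.mem_cons.mp hy with h | h
      · subst h; exact hle
      · exact hall y h
    cases hs : PySem.List.sorted (x :: L) keyT false with
    | nil => exact absurd ((PySem.List.sorted_eq_nil_iff _ _ _).mp hs) (by simp)
    | cons h tl =>
      have hhmem : h ∈ x :: L := (PySem.List.mem_sorted _ _ _ _).mp (by rw [hs]; simp)
      have hhle : ∀ y ∈ x :: L, keyT h ≤ keyT y := PySem.List.key_head_sorted_le _ _ hs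
      have heq : h = u := keyT_inj (le_antisymm (hhle u humem) (huall h hhmem))
      simp [heq]

-- ===== VERDICT (by name: the statement is the Claim_ definition above) =====
theorem transform_spec : Claim_equal_transform := by
  intro grid_lst _ _
  unfold Spec_transform transform transform_alt
  by_cases hnil : grid_lst = []
  · simp [hnil]
  · rw [if_neg hnil, if_neg hnil, if_neg (by simpa using hnil : ¬grid_lst.length = 0)]
    dsimp only
    congr 1
    apply List.map_congr_left
    intro r _
    by_cases hmid : grid_lst.length % 2 = 1 ∧ r = (grid_lst.length - 1) / 2
    · rw [if_pos hmid]
      rw [List.map_congr_left (fun c _ => by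
        unfold pvCellB
        rw [if_pos hmid] :
          ∀ c ∈ List.range (grid_lst.headD []).length,
            pvCellB grid_lst.length (pvInfoB (grid_lst.headD []).length
              (pvSeedsOf grid_lst.length (grid_lst.headD []) (grid_lst.getLastD []))) r c = 0)]
      simp [List.map_const']
    · rw [if_neg hmid]
      exact List.map_congr_left (fun c _ => pvCell_eq _ _ _ r c hmid)
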